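-- pv_equiv track=rewrite | github.com/pypi-data/pypi-mirror-342 | packages/npcpy/npcpy-0.3.33.tar.gz/npcpy-0.3.33/npcpy/shell_helpers.py | preprocess_markdown
-- ===== SOURCE A (Python) =====
-- import textwrap
--
-- def preprocess_markdown(md_text):
--     """
--     Preprocess markdown text to handle code blocks separately.
--     """
--     lines = md_text.split("\n")
--     processed_lines = []
--
--     inside_code_block = False
--     current_code_block = []
--
--     for line in lines:
--         if line.startswith("```"):  # Toggle code block
--             if inside_code_block:
--                 # Close code block, unindent, and append
--                 processed_lines.append("```")
--                 processed_lines.extend(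
--                     textwrap.dedent("\n".join(current_code_block)).split("\n")
--                 )
--                 processed_lines.append("```")
--                 current_code_block = []
--             inside_code_block = not inside_code_block
--         elif inside_code_block:
--             current_code_block.append(line)
--         else:
--             processed_lines.append(line)
--
--     return "\n".join(processed_lines)
-- ===== SOURCE B (Python) =====
-- import textwrap
--
--
-- def preprocess_markdown(md_text):
--     """Fence-pair scan: find each opening fence, seek its closing fence,
--     dedent the enclosed chunk, and emit everything else verbatim."""
--     lines = md_text.split("\n")
--     out = []
--     while lines:
--         head, rest = lines[0], lines[1:]
--         if head.startswith("```"):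
--             k = next((j for j, l in enumerate(rest) if l.startswith("```")), None)
--             if k is None:
--                 break  # unmatched fence: it and the remainder are dropped
--             out.append("```")
--             out.extend(textwrap.dedent("\n".join(rest[:k])).split("\n"))
--             out.append("```")
--             lines = rest[k + 1:]
--         else:
--             out.append(head)
--             lines = rest
--     return "\n".join(out)
-- ===== Notes on version B (the rewrite author's own statement) =====
-- stated objective: alternative
-- what changed: Replaces A's single-pass toggle-flag state machine (inside_code_block plus a current_code_block accumulator) with a fence-pair scan: emit lines until an opening fence, seek its closing fence, dedent the slice between them, and continue after the pair.
import Mathlib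
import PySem

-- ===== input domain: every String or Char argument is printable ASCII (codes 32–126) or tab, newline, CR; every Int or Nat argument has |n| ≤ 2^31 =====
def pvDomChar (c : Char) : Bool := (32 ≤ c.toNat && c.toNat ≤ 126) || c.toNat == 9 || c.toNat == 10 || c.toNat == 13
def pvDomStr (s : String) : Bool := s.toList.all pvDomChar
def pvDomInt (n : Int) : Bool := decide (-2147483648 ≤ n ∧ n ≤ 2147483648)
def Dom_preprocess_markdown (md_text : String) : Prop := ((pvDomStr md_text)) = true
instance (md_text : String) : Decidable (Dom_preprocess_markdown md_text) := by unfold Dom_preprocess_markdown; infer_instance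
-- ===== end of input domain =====

-- B replaces A's toggle-flag state machine by an opening-fence/closing-fence pair scan
-- (objective: alternative decomposition, same cost).

-- Shared library helpers: '\n'-split / '\n'-join and textwrap.dedent, which BOTH
-- Pythons call.  textwrap.dedent is hand-ported; it is exact on '\n'-separated text:
-- its two regexes ('^[ \t]+$' and '(^[ \t]*)(?:[^ \t\n])' in MULTILINE mode, and the
-- final '(?m)^margin' substitution) act independently on each '\n'-line, so the port
-- splits on '\n', transforms linewise, and joins back.
def pvSplitNl (cs : List Char) : List (List Char) := PySem.Chars.splitOn cs ['\n']
def pvJoinNl (ls : List (List Char)) : List Char := PySem.Chars.join ['\n'] ls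
def pvWs (c : Char) : Bool := c == ' ' || c == '\t'
-- a line matching '^[ \t]+$' (nonempty, all spaces/tabs) is replaced by ''
def pvNorm (l : List Char) : List Char := if !l.isEmpty && l.all pvWs then [] else l
-- '(^[ \t]*)(?:[^ \t\n])': the leading whitespace of a line containing a non-[ \t\n] char
def pvIndent? (l : List Char) : Option (List Char) :=
  if l.any (fun c => !(c == ' ' || c == '\t' || c == '\n')) then some (l.takeWhile pvWs) else none
-- the margin-update loop of textwrap.dedent computes the longest common prefix
def pvLCP : List Char → List Char → List Char
  | a :: as, b :: bs => if a = b then a :: pvLCP as bs else []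
  | _, _ => []
def pvDedentChars (cs : List Char) : List Char :=
  let ls := (pvSplitNl cs).map pvNorm
  let margin : List Char :=
    match ls.filterMap pvIndent? with
    | [] => []
    | i :: is => is.foldl pvLCP i
  if margin.isEmpty then pvJoinNl ls
  else pvJoinNl (ls.map (fun l => if margin.isPrefixOf l then l.drop margin.length else l))
def pvFence (l : List Char) : Bool := PySem.Chars.startswith l ['`', '`', '`']
-- textwrap.dedent("\n".join(xs)).split("\n"), as both Pythons write it
def pvDedentBlock (xs : List (List Char)) : List (List Char) :=
  pvSplitNl (pvDedentChars (pvJoinNl xs))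

-- ===== PORT A =====
-- A's loop body: state = (inside_code_block, current_code_block, processed_lines)
def pvStepA (st : Bool × List (List Char) × List (List Char)) (line : List Char) :
    Bool × List (List Char) × List (List Char) :=
  match st with
  | (inside, cb, out) =>
    if pvFence line then
      if inside then (false, [], out ++ [['`', '`', '`']] ++ pvDedentBlock cb ++ [['`', '`', '`']])
      else (true, cb, out)
    else if inside then (inside, cb ++ [line], out)
    else (inside, cb, out ++ [line])

def preprocess_markdown (md_text : String) : String :=
  String.ofList (pvJoinNl ((pvSplitNl md_text.toList).foldl pvStepA (false, [], [])).2.2)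

-- ===== PORT B =====
-- B's loop: emit until an opening fence, seek its closing fence, dedent the chunk between
def pvGoB : List (List Char) → List (List Char)
  | [] => []
  | head :: rest =>
    if pvFence head then
      match h : rest.dropWhile (fun l => !pvFence l) with
      | [] => []  -- unmatched fence: drop it and the remainder
      | _ :: rest' =>
        [['`', '`', '`']] ++ pvDedentBlock (rest.takeWhile (fun l => !pvFence l))
          ++ [['`', '`', '`']] ++ pvGoB rest'
    else head :: pvGoB rest
termination_by ls => ls.length
decreasing_by
  · have h1 : (rest.dropWhile (fun l => !pvFence l)).length ≤ rest.length :=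
      (List.dropWhile_sublist _).length_le
    rw [h] at h1; simp at h1 ⊢; omega
  · simp

def preprocess_markdown_alt (md_text : String) : String :=
  String.ofList (pvJoinNl (pvGoB (pvSplitNl md_text.toList)))

-- ===== PRECONDITION & SPEC =====
def Spec_preprocess_markdown (md_text : String) (out : String) : Prop := out = preprocess_markdown_alt md_text
instance (md_text : String) (out : String) : Decidable (Spec_preprocess_markdown md_text out) := by unfold Spec_preprocess_markdown; infer_instance

-- ===== CLAIM (what is proved, stated in full; the proofs are below) =====
def Claim_equal_preprocess_markdown : Prop := ∀ (md_text : String), Dom_preprocess_markdown md_text → Spec_preprocess_markdown md_text (preprocess_markdown md_text)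

-- ===== LEMMAS AND PROOFS =====

-- The loop invariant: A's fold from the outside state produces p ++ pvGoB ls; from the
-- inside state it produces the pending chunk's closing (or drops it when no fence remains).
theorem pvLoop (ls : List (List Char)) :
    (∀ p, (ls.foldl pvStepA (false, [], p)).2.2 = p ++ pvGoB ls) ∧
    (∀ cb p, (ls.foldl pvStepA (true, cb, p)).2.2 =
      match ls.dropWhile (fun l => !pvFence l) with
      | [] => p
      | _ :: rest' =>
        p ++ [['`', '`', '`']] ++ pvDedentBlock (cb ++ ls.takeWhile (fun l => !pvFence l))
          ++ [['`', '`', '`']] ++ pvGoB rest') := by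
  induction ls with
  | nil => simp [pvGoB]
  | cons head rest ih =>
    obtain ⟨ihOut, ihIn⟩ := ih
    by_cases hf : pvFence head = true
    · constructor
      · intro p
        rw [List.foldl_cons, show pvStepA (false, [], p) head = (true, [], p) by
          simp [pvStepA, hf]]
        rw [ihIn [] p, pvGoB]
        simp only [hf, if_pos]
        cases rest.dropWhile (fun l => !pvFence l) <;> simp
      · intro cb p
        rw [List.foldl_cons, show pvStepA (true, cb, p) head =
          (false, [], p ++ [['`', '`', '`']] ++ pvDedentBlock cb ++ [['`', '`', '`']]) by
          simp [pvStepA, hf]]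
        rw [ihOut]
        simp [hf]
    · constructor
      · intro p
        rw [List.foldl_cons, show pvStepA (false, [], p) head = (false, [], p ++ [head]) by
          simp [pvStepA, hf]]
        rw [ihOut, pvGoB]
        simp [hf]
      · intro cb p
        rw [List.foldl_cons, show pvStepA (true, cb, p) head = (true, cb ++ [head], p) by
          simp [pvStepA, hf]]
        rw [ihIn (cb ++ [head]) p]
        simp [hf]

-- ===== VERDICT (by name: the statement is the Claim_ definition above) =====
theorem preprocess_markdown_spec : Claim_equal_preprocess_markdown := by
  intro md _
  unfold Spec_preprocess_markdown preprocess_markdown preprocess_markdown_alt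
  rw [(pvLoop (pvSplitNl md.toList)).1 []]
  simp
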